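-- pv_equiv track=rewrite | github.com/doncd-p/COMP90024-23S1-A2-Australia-Social-Media-Analytics | src/backend/app/utils/couchdb_client.py | get_remote_db_name
-- ===== SOURCE A (Python) =====
-- def get_remote_db_name(db_name, server):
--     # Find the best matching database in the given server for CouchDB replicate renaming issue
--     best_match = None
--     for remote_db_name in server:
--         if db_name in remote_db_name:
--             if best_match is None or len(remote_db_name) < len(best_match):
--                 best_match = remote_db_name
--     if best_match is not None:
--         return best_match
--     else:
--         raise ValueError(f"Unknown database: {db_name}")
-- ===== SOURCE B (Python) =====
-- def get_remote_db_name(db_name, server):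
--     # sort-then-scan: stable sort by length, so the first name containing
--     # db_name is the shortest match (earliest on ties, like the original)
--     for name in sorted(server, key=len):
--         if db_name in name:
--             return name
--     raise ValueError(f"Unknown database: {db_name}")
-- ===== Notes on version B (the rewrite author's own statement) =====
-- stated objective: alternative
-- what changed: Replaces the fused single-pass best-match accumulator loop with sort-then-scan: stable-sort the names by length, then return the first one containing db_name; stability preserves the earliest-shortest tie-break.
import Mathlib
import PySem

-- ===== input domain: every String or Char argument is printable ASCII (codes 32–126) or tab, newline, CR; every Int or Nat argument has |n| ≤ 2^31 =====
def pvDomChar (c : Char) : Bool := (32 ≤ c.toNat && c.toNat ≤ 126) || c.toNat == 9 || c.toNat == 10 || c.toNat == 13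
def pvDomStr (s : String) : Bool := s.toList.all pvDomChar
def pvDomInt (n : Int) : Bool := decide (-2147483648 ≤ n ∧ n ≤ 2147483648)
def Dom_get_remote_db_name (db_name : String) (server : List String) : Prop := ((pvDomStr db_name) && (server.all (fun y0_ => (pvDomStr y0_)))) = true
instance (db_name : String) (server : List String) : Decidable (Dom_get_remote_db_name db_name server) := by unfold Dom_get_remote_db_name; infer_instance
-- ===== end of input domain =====

-- B replaces A's fused best-match accumulator loop by sort-then-scan: stable-sort by length,
-- then return the first name containing db_name (objective: alternative decomposition).
-- Both A and B raise ValueError when no server name contains db_name; those inputs are outside Pre_.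

-- ===== PORT A =====
-- literal port of A: one fold threading an Option best_match accumulator; the raise branch (best = none) is outside Pre_
def get_remote_db_name (db_name : String) (server : List String) : String :=
  let best := server.foldl
    (fun best remote_db_name =>
      if PySem.Str.isIn db_name remote_db_name then
        match best with
        | none => some remote_db_name
        | some b =>
          if PySem.Str.len remote_db_name < PySem.Str.len b then some remote_db_name else some b
      else best)
    none
  match best with
  | some b => b
  | none => ""  -- raise ValueError: excluded by Pre_

-- ===== PORT B =====
-- literal port of B: sorted(server, key=len) (stable), then the first element with db_name in it
def get_remote_db_name_alt (db_name : String) (server : List String) : String :=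
  match (PySem.List.sorted server PySem.Str.len).find? (fun name => PySem.Str.isIn db_name name) with
  | some name => name
  | none => ""  -- raise ValueError: excluded by Pre_

-- ===== PRECONDITION & SPEC =====
-- Pre_ excludes exactly the inputs where no server name contains db_name: there both A and B raise ValueError
def Pre_get_remote_db_name (db_name : String) (server : List String) : Prop :=
  server.any (fun name => PySem.Str.isIn db_name name) = true
instance (db_name : String) (server : List String) : Decidable (Pre_get_remote_db_name db_name server) := by unfold Pre_get_remote_db_name; infer_instance
def pvWitness_get_remote_db_name : String × List String := ("db", ["mydb_remote", "db1"])

def Spec_get_remote_db_name (db_name : String) (server : List String) (out : String) : Prop := out = get_remote_db_name_alt db_name server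
instance (db_name : String) (server : List String) (out : String) : Decidable (Spec_get_remote_db_name db_name server out) := by unfold Spec_get_remote_db_name; infer_instance

-- ===== CLAIM (what is proved, stated in full; the proofs are below) =====
def Claim_equal_get_remote_db_name : Prop := ∀ (db_name : String) (server : List String), Dom_get_remote_db_name db_name server → Pre_get_remote_db_name db_name server → Spec_get_remote_db_name db_name server (get_remote_db_name db_name server)

-- ===== LEMMAS AND PROOFS =====

-- A's accumulator step (the body of its fold), named for the proofs
def pvStepA (db_name : String) (best : Option String) (x : String) : Option String :=
  if PySem.Str.isIn db_name x then
    match best with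
    | none => some x
    | some b => if PySem.Str.len x < PySem.Str.len b then some x else some b
  else best

-- inserting into a length-sorted list keeps it length-sorted
theorem pairwise_insertBy_len (x : String) (acc : List String)
    (h : acc.Pairwise (fun a b => PySem.Str.len a ≤ PySem.Str.len b)) :
    (PySem.List.insertBy (fun a b => decide (PySem.Str.len a < PySem.Str.len b)) x acc).Pairwise
      (fun a b => PySem.Str.len a ≤ PySem.Str.len b) := by
  induction acc with
  | nil => simp [PySem.List.insertBy]
  | cons y ys ih =>
    rcases List.pairwise_cons.mp h with ⟨hy, hys⟩
    by_cases hlt : PySem.Str.len x < PySem.Str.len y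
    · simp only [PySem.List.insertBy, hlt, decide_true, if_true]
      refine List.pairwise_cons.mpr ⟨?_, h⟩
      intro z hz
      rcases List.mem_cons.mp hz with rfl | hz
      · exact le_of_lt hlt
      · exact le_trans (le_of_lt hlt) (hy z hz)
    · simp only [PySem.List.insertBy, hlt, decide_false, Bool.false_eq_true, if_false]
      refine List.pairwise_cons.mpr ⟨?_, ih hys⟩
      intro z hz
      rcases (PySem.List.mem_insertBy _ _ _ _).mp hz with rfl | hz
      · exact le_of_not_gt hlt
      · exact hy z hz

-- first match of an insertion into a length-sorted list = A's accumulator step on the old first match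
theorem find?_insertBy_len (db_name x : String) (acc : List String)
    (h : acc.Pairwise (fun a b => PySem.Str.len a ≤ PySem.Str.len b)) :
    (PySem.List.insertBy (fun a b => decide (PySem.Str.len a < PySem.Str.len b)) x acc).find?
        (fun n => PySem.Str.isIn db_name n)
      = pvStepA db_name (acc.find? (fun n => PySem.Str.isIn db_name n)) x := by
  induction acc with
  | nil => simp [PySem.List.insertBy, pvStepA]
  | cons y ys ih =>
    rcases List.pairwise_cons.mp h with ⟨hy, hys⟩
    by_cases hlt : PySem.Str.len x < PySem.Str.len y
    · simp only [PySem.List.insertBy, hlt, decide_true, if_true]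
      by_cases hp : PySem.Str.isIn db_name x
      · rw [List.find?_cons_of_pos hp]
        unfold pvStepA
        rw [if_pos hp]
        cases hfy : (y :: ys).find? (fun n => PySem.Str.isIn db_name n) with
        | none => rfl
        | some b =>
          have hb : b ∈ y :: ys := List.mem_of_find?_eq_some hfy
          have hyb : PySem.Str.len y ≤ PySem.Str.len b := by
            rcases List.mem_cons.mp hb with rfl | hb
            · exact le_refl _
            · exact hy b hb
          show some x = if PySem.Str.len x < PySem.Str.len b then some x else some b
          rw [if_pos (lt_of_lt_of_le hlt hyb)]
      · rw [List.find?_cons_of_neg hp]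
        unfold pvStepA
        rw [if_neg hp]
    · simp only [PySem.List.insertBy, hlt, decide_false, Bool.false_eq_true, if_false]
      by_cases hpy : PySem.Str.isIn db_name y
      · rw [List.find?_cons_of_pos hpy, List.find?_cons_of_pos hpy]
        unfold pvStepA
        by_cases hp : PySem.Str.isIn db_name x
        · rw [if_pos hp]
          show some y = if PySem.Str.len x < PySem.Str.len y then some x else some y
          rw [if_neg hlt]
        · rw [if_neg hp]
      · rw [List.find?_cons_of_neg hpy, List.find?_cons_of_neg hpy]
        exact ih hys

-- the first match of the insertion-sort fold equals A's fused fold, for any sorted accumulator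
theorem find?_foldl_insertBy (db_name : String) (xs acc : List String)
    (h : acc.Pairwise (fun a b => PySem.Str.len a ≤ PySem.Str.len b)) :
    (xs.foldl (fun a x => PySem.List.insertBy (fun a b => decide (PySem.Str.len a < PySem.Str.len b)) x a) acc).find?
        (fun n => PySem.Str.isIn db_name n)
      = xs.foldl (pvStepA db_name) (acc.find? (fun n => PySem.Str.isIn db_name n)) := by
  induction xs generalizing acc with
  | nil => rfl
  | cons x xs ih =>
    simp only [List.foldl_cons]
    rw [ih _ (pairwise_insertBy_len x acc h), find?_insertBy_len db_name x acc h]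

-- A = B: both select the earliest shortest match
theorem get_remote_db_name_eq_alt (db_name : String) (server : List String) :
    get_remote_db_name db_name server = get_remote_db_name_alt db_name server := by
  unfold get_remote_db_name get_remote_db_name_alt
  rw [PySem.List.sorted_eq_foldl_insertBy,
      find?_foldl_insertBy db_name server [] List.Pairwise.nil]
  rfl

-- ===== VERDICT (by name: the statement is the Claim_ definition above) =====
theorem get_remote_db_name_spec : Claim_equal_get_remote_db_name := by
  intro db_name server _ _
  exact get_remote_db_name_eq_alt db_name server
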